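-- pv_equiv track=rewrite | github.com/anubhavratha/PolicybasedReserves_CC | Pcc_ChanceConstrained_ReserveAllocation.py | units_in_node
-- ===== SOURCE A (Python) =====
-- def units_in_node(data,key):
--     #This function provides the unit numbers for nodes
--     # Mapping
--     temp_dict= {}
--     for k, v in data.items():
--            for k2, v2 in v.items():
--                       temp_dict[(k, k2)] = v2
--     length = sum(value == key for value in temp_dict.values())
--     solution=[]
--
--     for g in range(length):
--             solution.append([k for k, v in temp_dict.items() if v == key][g][0])
--
--     return solution
-- ===== SOURCE B (Python) =====
-- def units_in_node(data, key):
--     # Iterate the nested dict directly; no flattened table, no per-index re-scan.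
--     return [k for k, v in data.items() for v2 in v.values() if v2 == key]
-- ===== Notes on version B (the rewrite author's own statement) =====
-- stated objective: faster
-- what changed: B walks the nested dict once with a single comprehension instead of building a flattened (k,k2)->v table, counting matches, and rebuilding the whole filtered key list once per output index.
import Mathlib
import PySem

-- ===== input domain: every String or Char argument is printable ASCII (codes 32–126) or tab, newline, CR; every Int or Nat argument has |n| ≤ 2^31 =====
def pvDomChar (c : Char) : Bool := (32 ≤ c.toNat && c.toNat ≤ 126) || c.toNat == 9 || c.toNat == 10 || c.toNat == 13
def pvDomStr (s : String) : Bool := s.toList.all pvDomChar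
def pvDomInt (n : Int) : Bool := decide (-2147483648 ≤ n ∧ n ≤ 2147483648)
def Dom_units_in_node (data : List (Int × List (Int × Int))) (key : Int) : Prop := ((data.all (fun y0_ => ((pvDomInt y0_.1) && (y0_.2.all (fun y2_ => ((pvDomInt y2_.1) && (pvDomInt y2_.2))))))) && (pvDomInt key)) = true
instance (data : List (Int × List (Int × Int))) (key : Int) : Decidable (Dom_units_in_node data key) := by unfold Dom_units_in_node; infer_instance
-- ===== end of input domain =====

-- B replaces A's flattened (k,k2)->v table, match count and per-index re-scan
-- by a single pass over the nested dict (objective: faster, one pass instead of a rebuild per output index).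


-- ===== PORT A =====
def units_in_node (data : List (Int × List (Int × Int))) (key : Int) : List Int :=
  -- temp_dict = {}; for k, v in data.items(): for k2, v2 in v.items(): temp_dict[(k,k2)] = v2
  let temp : PySem.Dict (Int × Int) Int :=
    data.foldl (fun d p => p.2.foldl (fun d q => d.insert (p.1, q.1) q.2) d) PySem.Dict.empty
  -- length = sum(value == key for value in temp_dict.values())
  let length : Int := (temp.values.map (fun v => if v = key then (1 : Int) else 0)).sum
  -- for g in range(length): solution.append([k for k, v in temp_dict.items() if v == key][g][0])
  (PySem.List.pyRange 0 length 1).foldl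
    (fun sol g =>
      match PySem.List.pyGet? ((temp.items.filter (fun kv => kv.2 == key)).map (fun kv => kv.1)) g with
      | some k => sol ++ [k.1]
      | none => sol)   -- unreachable: g < length = number of matches (Python would raise IndexError)
    []

-- ===== PORT B =====
def units_in_node_alt (data : List (Int × List (Int × Int))) (key : Int) : List Int :=
  -- [k for k, v in data.items() for v2 in v.values() if v2 == key]
  data.flatMap (fun p => (p.2.filter (fun q => q.2 == key)).map (fun _ => p.1))

-- ===== PRECONDITION & SPEC =====
-- Pre_ excludes assoc lists whose flattened (outer,inner) key pairs repeat: a real Python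
-- dict-of-dicts cannot contain them, and there A's dict overwrite order is accidental.
def Pre_units_in_node (data : List (Int × List (Int × Int))) (key : Int) : Prop :=
  ((data.flatMap (fun p => p.2.map (fun q => (p.1, q.1)))).Nodup)
instance (data : List (Int × List (Int × Int))) (key : Int) : Decidable (Pre_units_in_node data key) := by unfold Pre_units_in_node; infer_instance
def pvWitness_units_in_node : (List (Int × List (Int × Int))) × Int :=
  ([(1, [(1, 5), (2, 3)]), (2, [(7, 5)]), (3, [])], 5)
def Spec_units_in_node (data : List (Int × List (Int × Int))) (key : Int) (out : List Int) : Prop := out = units_in_node_alt data key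
instance (data : List (Int × List (Int × Int))) (key : Int) (out : List Int) : Decidable (Spec_units_in_node data key out) := by unfold Spec_units_in_node; infer_instance

-- ===== CLAIM (what is proved, stated in full; the proofs are below) =====
def Claim_equal_units_in_node : Prop := ∀ (data : List (Int × List (Int × Int))) (key : Int), Dom_units_in_node data key → Pre_units_in_node data key → Spec_units_in_node data key (units_in_node data key)

-- ===== LEMMAS AND PROOFS =====

-- flattened item list A's first loop builds
def pvFlat (data : List (Int × List (Int × Int))) : List ((Int × Int) × Int) :=
  data.flatMap (fun p => p.2.map (fun q => ((p.1, q.1), q.2)))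

lemma pvFlat_keys (data : List (Int × List (Int × Int))) :
    (pvFlat data).map (fun kv => kv.1) = data.flatMap (fun p => p.2.map (fun q => (p.1, q.1))) := by
  simp [pvFlat, List.map_flatMap, Function.comp_def]

-- A's dict-building loop appends exactly the flattened list when all incoming keys are fresh and distinct
lemma pv_loop_items (data : List (Int × List (Int × Int)))
    (d : PySem.Dict (Int × Int) Int)
    (hnd : d.keys.Nodup)
    (hdisj : ∀ x ∈ (pvFlat data).map (fun kv => kv.1), x ∉ d.keys)
    (hnodup : ((pvFlat data).map (fun kv => kv.1)).Nodup) :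
    (data.foldl (fun d p => p.2.foldl (fun d q => d.insert (p.1, q.1) q.2) d) d).items
      = d.items ++ pvFlat data := by
  induction data generalizing d with
  | nil => simp [pvFlat]
  | cons p rest ih =>
    have hflat : pvFlat (p :: rest) = p.2.map (fun q => ((p.1, q.1), q.2)) ++ pvFlat rest := by
      simp [pvFlat]
    rw [hflat] at hdisj hnodup
    simp only [List.map_append, List.map_map, Function.comp_def, List.nodup_append] at hdisj hnodup
    have hd1 : ∀ x ∈ p.2.map (fun q => ((p.1 : Int), q.1)), x ∉ d.keys := by
      intro x hx
      refine hdisj x ?_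
      exact List.mem_append.2 (Or.inl hx)
    have hd2 : ∀ x ∈ (pvFlat rest).map (fun kv => kv.1), x ∉ d.keys := by
      intro x hx
      refine hdisj x ?_
      exact List.mem_append.2 (Or.inr hx)
    obtain ⟨hn1, hn2, hn12⟩ := hnodup
    have hinner :
        (p.2.foldl (fun d q => d.insert (p.1, q.1) q.2) d).items
          = d.items ++ p.2.map (fun q => ((p.1, q.1), q.2)) := by
      apply PySem.Dict.items_foldl_insert_fresh
      · intro q hq
        have : (p.1, q.1) ∉ d.keys := hd1 _ (List.mem_map.2 ⟨q, hq, rfl⟩)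
        simp [PySem.Dict.contains_eq_decide_mem_keys, this]
      · exact hn1
    have hkeys : (p.2.foldl (fun d q => d.insert (p.1, q.1) q.2) d).keys
        = d.keys ++ p.2.map (fun q => ((p.1 : Int), q.1)) := by
      show (p.2.foldl (fun d q => d.insert (p.1, q.1) q.2) d).items.map (fun kv => kv.1)
          = d.items.map (fun kv => kv.1) ++ _
      rw [hinner]
      simp [List.map_map, Function.comp_def]
    simp only [List.foldl_cons]
    rw [ih _ ?_ ?_ hn2, hinner, List.append_assoc, hflat]
    · rw [hkeys]
      refine List.Nodup.append hnd hn1 ?_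
      intro x hx1 hx2
      exact hd1 x hx2 hx1
    · intro x hx
      rw [hkeys]
      simp only [List.mem_append, not_or]
      exact ⟨hd2 x hx, fun hmem => hn12 x hmem x hx rfl⟩

-- the 0/1 sum over the values equals the length of the filtered item list, as an Int
lemma pv_length_eq (L : List ((Int × Int) × Int)) (key : Int) :
    (L.map (fun kv => if kv.2 = key then (1 : Int) else 0)).sum
      = ((L.filter (fun kv => kv.2 == key)).length : Int) := by
  induction L with
  | nil => simp
  | cons x xs ih =>
    by_cases h : x.2 = key <;>
      simp [List.filter_cons, h, ih] <;> omega

-- the range-indexed rebuild loop is just List.map over the filtered list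
lemma pv_range_loop (xs : List (Int × Int)) (acc : List Int) (n : Nat) (h : n ≤ xs.length) :
    (PySem.List.pyRange ((xs.length : Int) - n) (xs.length : Int) 1).foldl
      (fun sol g => match PySem.List.pyGet? xs g with
        | some k => sol ++ [k.1]
        | none => sol) acc
    = acc ++ (xs.drop (xs.length - n)).map (fun k => k.1) := by
  induction n generalizing acc with
  | zero => simp [PySem.List.pyRange_one_eq_nil]
  | succ m ih =>
    simp only [Nat.cast_add, Nat.cast_one]
    have hlt : (xs.length : Int) - ((m : Int) + 1) < (xs.length : Int) := by omega
    rw [PySem.List.pyRange_one_cons hlt]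
    simp only [List.foldl_cons]
    have hidx : (xs.length : Int) - ((m : Int) + 1) = ((xs.length - (m + 1) : Nat) : Int) := by omega
    have hlen : xs.length - (m + 1) < xs.length := by omega
    have hget : PySem.List.pyGet? xs ((xs.length : Int) - ((m : Int) + 1))
        = some xs[xs.length - (m + 1)] := by
      rw [hidx, PySem.List.pyGet?_natCast, List.getElem?_eq_getElem hlen]
    rw [hget]
    have hred : (match some xs[xs.length - (m + 1)] with
        | some k => acc ++ [k.1]
        | none => acc) = acc ++ [(xs[xs.length - (m + 1)]).1] := rfl
    rw [hred]
    have harith : (xs.length : Int) - ((m : Int) + 1) + 1 = (xs.length : Int) - (m : Int) := by ring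
    rw [harith, ih _ (by omega)]
    have hdrop : xs.drop (xs.length - (m + 1))
        = xs[xs.length - (m + 1)] :: xs.drop (xs.length - m) := by
      have e : xs.length - (m + 1) + 1 = xs.length - m := by omega
      rw [List.drop_eq_getElem_cons hlen, e]
    rw [hdrop]
    simp

-- the filtered flattened list, projected to outer keys, is B's one-pass result
lemma pv_filtered_eq (data : List (Int × List (Int × Int))) (key : Int) :
    ((pvFlat data).filter (fun kv => kv.2 == key)).map (fun kv => kv.1.1)
      = units_in_node_alt data key := by
  induction data with
  | nil => rfl
  | cons p rest ih =>
    simp only [pvFlat, units_in_node_alt, List.flatMap_cons, List.filter_append,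
      List.map_append] at ih ⊢
    rw [ih]
    congr 1
    rw [List.filter_map, List.map_map]
    simp only [Function.comp_def]

-- ===== VERDICT (by name: the statement is the Claim_ definition above) =====
theorem units_in_node_spec : Claim_equal_units_in_node := by
  intro data key _hdom hpre
  unfold Spec_units_in_node units_in_node
  have hpre' : ((pvFlat data).map (fun kv => kv.1)).Nodup := by
    rw [pvFlat_keys]; exact hpre
  have hitems :
      (data.foldl (fun d p => p.2.foldl (fun d q => d.insert (p.1, q.1) q.2) d)
        PySem.Dict.empty).items = pvFlat data := by
    simpa using pv_loop_items data PySem.Dict.empty (by simp [PySem.Dict.empty])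
      (by simp [PySem.Dict.empty]) hpre'
  simp only []
  rw [show (data.foldl (fun d p => p.2.foldl (fun d q => d.insert (p.1, q.1) q.2) d)
        PySem.Dict.empty).values
      = (data.foldl (fun d p => p.2.foldl (fun d q => d.insert (p.1, q.1) q.2) d)
        PySem.Dict.empty).items.map (fun kv => kv.2) from rfl, hitems]
  rw [List.map_map]
  simp only [Function.comp_def]
  rw [pv_length_eq]
  set xs := ((pvFlat data).filter (fun kv => kv.2 == key)).map (fun kv => kv.1) with hxs
  have hlenxs : ((pvFlat data).filter (fun kv => kv.2 == key)).length = xs.length := by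
    simp [hxs]
  rw [hlenxs]
  have hloop := pv_range_loop xs [] xs.length (le_refl _)
  simp only [sub_self, Nat.sub_self, List.drop_zero, List.nil_append] at hloop
  rw [hloop, hxs, List.map_map]
  simp only [Function.comp_def]
  exact pv_filtered_eq data key
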